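-- pv_equiv track=rewrite | github.com/drooling/tragedy-self | modules/core/info.py | _validate_guess
-- ===== SOURCE A (Python) =====
-- def _validate_guess(email_domain: str, domain: str) -> bool:
-- 	if len(email_domain) != len(domain):
-- 		return False
-- 	positions = []
-- 	[positions.append((position, char)) for position, char in enumerate(email_domain) if char != '*']
-- 	for position, char in positions:
-- 		if domain[position] != char:
-- 			return False
-- 	return True
-- ===== SOURCE B (Python) =====
-- def _validate_guess(email_domain: str, domain: str) -> bool:
--     if len(email_domain) != len(domain):
--         return False
--     stars = {position for position, char in enumerate(email_domain) if char == '*'}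
--     mismatches = {position for position, pair in enumerate(zip(email_domain, domain))
--                   if pair[0] != pair[1]}
--     return mismatches.issubset(stars)
-- ===== Notes on version B (the rewrite author's own statement) =====
-- stated objective: alternative
-- what changed: Reformulates the check in set algebra: build the set of wildcard positions and the set of positions where the two strings disagree, and return whether the mismatch set is a subset of the wildcard set, instead of A's filter-positions-then-index-and-early-return loop.
import Mathlib
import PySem

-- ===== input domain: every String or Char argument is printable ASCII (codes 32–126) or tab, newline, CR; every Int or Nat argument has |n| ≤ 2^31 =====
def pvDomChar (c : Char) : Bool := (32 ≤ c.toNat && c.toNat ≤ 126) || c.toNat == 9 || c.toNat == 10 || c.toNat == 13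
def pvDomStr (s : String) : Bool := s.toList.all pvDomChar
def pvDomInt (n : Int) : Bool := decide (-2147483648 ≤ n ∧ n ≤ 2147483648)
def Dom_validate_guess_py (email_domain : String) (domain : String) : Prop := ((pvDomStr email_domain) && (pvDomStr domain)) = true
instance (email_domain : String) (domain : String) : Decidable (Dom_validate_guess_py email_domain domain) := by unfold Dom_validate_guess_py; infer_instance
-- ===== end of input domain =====

-- B reformulates the check in set algebra (mismatch-position set ⊆ wildcard-position set)
-- instead of A's filter-positions-then-index-and-early-return loop; same return value everywhere.

-- ===== PORT A =====
-- loop 'for position, char in positions: if domain[position] != char: return False'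
-- (the none branch of pyGet? is Python's IndexError; it is unreachable because the
--  length check guarantees every enumerate index is in range)
def pvLoopA (dl : List Char) : List (Int × Char) → Bool
  | [] => true
  | (p, c) :: rest =>
    match PySem.List.pyGet? dl p with
    | some d => if d ≠ c then false else pvLoopA dl rest
    | none => false

def validate_guess_py (email_domain : String) (domain : String) : Bool :=
  if email_domain.toList.length ≠ domain.toList.length then false
  else
    let positions := (PySem.List.enumerate email_domain.toList 0).filter (fun pc => pc.2 ≠ '*')
    pvLoopA domain.toList positions

-- ===== PORT B =====
def validate_guess_py_alt (email_domain : String) (domain : String) : Bool :=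
  if email_domain.toList.length ≠ domain.toList.length then false
  else
    let stars : PySem.Set Int := PySem.Set.ofList
      (((PySem.List.enumerate email_domain.toList 0).filter
          (fun pc => pc.2 == '*')).map Prod.fst)
    let mismatches : PySem.Set Int := PySem.Set.ofList
      (((PySem.List.enumerate (email_domain.toList.zip domain.toList) 0).filter
          (fun pp => pp.2.1 != pp.2.2)).map Prod.fst)
    PySem.Set.issubset mismatches stars

-- ===== PRECONDITION & SPEC =====
def Spec_validate_guess_py (email_domain : String) (domain : String) (out : Bool) : Prop := out = validate_guess_py_alt email_domain domain
instance (email_domain : String) (domain : String) (out : Bool) : Decidable (Spec_validate_guess_py email_domain domain out) := by unfold Spec_validate_guess_py; infer_instance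

-- ===== CLAIM (what is proved, stated in full; the proofs are below) =====
def Claim_equal_validate_guess_py : Prop := ∀ (email_domain : String) (domain : String), Dom_validate_guess_py email_domain domain → Spec_validate_guess_py email_domain domain (validate_guess_py email_domain domain)

-- ===== LEMMAS AND PROOFS =====

-- A's loop over the non-wildcard positions equals the aligned all-pairs check
theorem pvLoopA_key : ∀ (el : List Char) (pre dl : List Char), el.length = dl.length →
    pvLoopA (pre ++ dl) ((PySem.List.enumerate el (pre.length : Int)).filter (fun pc => pc.2 ≠ '*'))
      = (el.zip dl).all (fun pd => pd.1 == '*' || pd.1 == pd.2)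
  | [], pre, dl, h => by
    have : dl = [] := List.eq_nil_of_length_eq_zero h.symm
    subst this
    simp [pvLoopA, PySem.List.enumerate_nil]
  | c :: el, pre, dl, h => by
    match dl, h with
    | d :: dl', h =>
      have hlen : el.length = dl'.length := by simpa using h
      have ih := pvLoopA_key el (pre ++ [d]) dl' hlen
      simp only [List.length_append, List.length_singleton, List.append_assoc,
        List.singleton_append, Nat.cast_add, Nat.cast_one] at ih
      rw [PySem.List.enumerate_cons]
      by_cases hc : c = '*'
      · subst hc
        simp only [List.filter_cons, ne_eq, decide_not] at ih ⊢
        simp [ih]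
      · have hkeep : (fun pc : Int × Char => !decide (pc.2 = '*')) ((pre.length : Int), c) = true := by
          simp [hc]
        simp only [List.filter_cons, ne_eq, decide_not] at ih ⊢
        rw [if_pos hkeep]
        rw [pvLoopA, PySem.List.pyGet?_append_length pre dl' d]
        by_cases hd : d = c
        · subst hd
          simp [ih]
        · have hcd : c ≠ d := fun hh => hd hh.symm
          simp [hd, hcd, hc]

-- B's subset test equals the same aligned all-pairs check
theorem pvSubset_key (el dl : List Char) (h : el.length = dl.length) :
    PySem.Set.issubset
      (PySem.Set.ofList (((PySem.List.enumerate (el.zip dl) 0).filter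
          (fun pp => pp.2.1 != pp.2.2)).map Prod.fst))
      (PySem.Set.ofList (((PySem.List.enumerate el 0).filter
          (fun pc => pc.2 == '*')).map Prod.fst))
      = (el.zip dl).all (fun pd => pd.1 == '*' || pd.1 == pd.2) := by
  have hz : (el.zip dl).length = el.length := by simp [h]
  have memM : ∀ i : Int,
      (i ∈ (((PySem.List.enumerate (el.zip dl) 0).filter (fun pp => pp.2.1 != pp.2.2)).map Prod.fst))
      ↔ ∃ (k : Nat) (hk : k < (el.zip dl).length), i = (k : Int) ∧ (el.zip dl)[k].1 ≠ (el.zip dl)[k].2 := by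
    intro i
    simp [List.mem_map, List.mem_filter, PySem.List.mem_enumerate_iff]
  have memS : ∀ i : Int,
      (i ∈ (((PySem.List.enumerate el 0).filter (fun pc => pc.2 == '*')).map Prod.fst))
      ↔ ∃ (k : Nat) (hk : k < el.length), i = (k : Int) ∧ el[k] = '*' := by
    intro i
    simp [List.mem_map, List.mem_filter, PySem.List.mem_enumerate_iff]
  rw [Bool.eq_iff_iff, PySem.Set.issubset_iff, List.all_eq_true]
  constructor
  · intro hsub p hp
    obtain ⟨k, hk, rfl⟩ := List.mem_iff_getElem.mp hp
    have hk1 : k < el.length := hz ▸ hk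
    have hk2 : k < dl.length := h ▸ hk1
    by_cases hne : el[k] = dl[k]
    · simp [List.getElem_zip, hne]
    · have hmM : ((k : Int)) ∈ (PySem.Set.ofList (((PySem.List.enumerate (el.zip dl) 0).filter (fun pp => pp.2.1 != pp.2.2)).map Prod.fst)) := by
        rw [PySem.Set.mem_ofList, memM]
        exact ⟨k, hk, rfl, by simp [List.getElem_zip, hne]⟩
      have hmS := hsub _ hmM
      rw [PySem.Set.mem_ofList, memS] at hmS
      obtain ⟨k', hk', hkk, hstar⟩ := hmS
      have : k' = k := by exact_mod_cast hkk.symm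
      subst this
      simp [List.getElem_zip, hstar]
  · intro hall i hi
    rw [PySem.Set.mem_ofList, memM] at hi
    obtain ⟨k, hk, rfl, hne⟩ := hi
    have hk1 : k < el.length := hz ▸ hk
    have := hall _ (List.getElem_mem hk)
    rw [PySem.Set.mem_ofList, memS]
    refine ⟨k, hk1, rfl, ?_⟩
    simp only [List.getElem_zip] at this hne
    simpa [hne] using this

-- ===== VERDICT (by name: the statement is the Claim_ definition above) =====
theorem validate_guess_py_spec : Claim_equal_validate_guess_py := by
  intro e d _
  unfold Spec_validate_guess_py validate_guess_py validate_guess_py_alt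
  split_ifs with hif
  · rfl
  · have h : e.toList.length = d.toList.length := not_not.mp hif
    have keyA := pvLoopA_key e.toList [] d.toList h
    simp only [List.length_nil, Nat.cast_zero, List.nil_append, ne_eq, decide_not] at keyA
    have keyB := pvSubset_key e.toList d.toList h
    simp only [keyB]
    simpa using keyA
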